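-- pv_equiv track=rewrite | github.com/Elias-Moral/09-mots-langue-francaise | main.py | cherche2
-- ===== SOURCE A (Python) =====
-- def cherche2(mots, lstart, lmid, lstop, nmin, nmax):
--     """effectue une recherche complexe dans un ensemble de mots
--
--     Args:
--         mots (set): ensemble de mots
--         lstart (list): liste des préfixes
--         lmid (list): liste des chaines de caractères intermédiaires
--         lstop (list): liste des suffixes
--         nmin (int): nombre de lettres minimum
--         nmax (int): nombre de lettres maximum
--
--     Returns:
--         set: retourne le sous ensemble des mots commençant par une chaine
--          présente dans lstart, contenant une chaine présente dans lmid et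
--          finissant par une chaine présente dans lstop, avec un nombre de lettres entre
--            nmin et nmax
--
--     >>> mots = ensemble_mots(FILENAME)
--     >>> mab17ez = cherche2(mots, 'a', 'b', 'z', 16, 16)
--     >>> isinstance(mab17ez, set)
--     True
--     >>> len(mab17ez)
--     1
--     >>> mab17ez
--     {'alphabétisassiez'}
--     """
--     m_z2=set()
--     temp1=set()
--     temp2=set()
--     temp3=set()
--     for elem in mots:
--         for prefix in lstart:
--             if elem.startswith(prefix):
--                 temp1.add(elem)
--         for suffix in lstop:
--             if elem.endswith(suffix):
--                 temp2.add(elem)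
--         for suffix in lmid:
--             if suffix in elem:
--                 temp3.add(elem)
--     temp4= temp1 & temp2 & temp3
--     for elem in temp4:
--         if len(elem)<=nmax and len(elem)>=nmin:
--             m_z2.add(elem)
--     return m_z2
-- ===== SOURCE B (Python) =====
-- def cherche2(mots, lstart, lmid, lstop, nmin, nmax):
--     return {w for w in mots
--             if nmin <= len(w) <= nmax
--             and any(w.startswith(p) for p in lstart)
--             and any(w.endswith(s) for s in lstop)
--             and any(s in w for s in lmid)}
-- ===== Notes on version B (the rewrite author's own statement) =====
-- stated objective: simpler
-- what changed: Replaced the three per-pattern accumulation sets, the set intersection and the separate length-filter pass by a single set comprehension testing each word once against the conjunction of length, any-prefix, any-suffix and any-substring conditions.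
import Mathlib
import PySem

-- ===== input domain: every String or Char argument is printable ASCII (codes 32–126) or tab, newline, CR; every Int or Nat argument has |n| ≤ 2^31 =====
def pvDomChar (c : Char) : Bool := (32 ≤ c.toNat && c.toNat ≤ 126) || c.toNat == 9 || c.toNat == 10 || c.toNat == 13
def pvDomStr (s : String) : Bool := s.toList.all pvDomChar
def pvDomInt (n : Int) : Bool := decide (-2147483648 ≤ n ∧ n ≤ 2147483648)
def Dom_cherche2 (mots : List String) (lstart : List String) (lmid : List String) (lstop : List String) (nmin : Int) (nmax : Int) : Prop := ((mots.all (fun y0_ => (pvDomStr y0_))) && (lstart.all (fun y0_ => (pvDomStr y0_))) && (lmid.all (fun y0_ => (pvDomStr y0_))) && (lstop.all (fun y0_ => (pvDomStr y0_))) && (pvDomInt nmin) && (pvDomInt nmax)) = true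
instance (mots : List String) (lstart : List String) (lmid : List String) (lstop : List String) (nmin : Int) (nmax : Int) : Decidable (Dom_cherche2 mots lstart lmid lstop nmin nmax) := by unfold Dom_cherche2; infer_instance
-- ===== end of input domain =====

-- B replaces A's three per-pattern accumulation sets + intersection + second length-filter pass by a
-- single set comprehension testing each word once against the conjunction of the four conditions (simpler).
-- Both ports build Python sets; outputs are sets (compared as finite sets per the convention).

-- ===== PORT A =====
def cherche2 (mots : List String) (lstart : List String) (lmid : List String) (lstop : List String) (nmin : Int) (nmax : Int) : List String :=
  -- temp1/temp2/temp3 are built in ONE pass over mots, as in A; state = ((temp1, temp2), temp3)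
  let acc := mots.foldl
    (fun (s : (PySem.Set String × PySem.Set String) × PySem.Set String) elem =>
      ((lstart.foldl (fun t1 pre => if PySem.Str.startswith elem pre then PySem.Set.add t1 elem else t1) s.1.1,
        lstop.foldl (fun t2 suf => if PySem.Str.endswith elem suf then PySem.Set.add t2 elem else t2) s.1.2),
       lmid.foldl (fun t3 suf => if PySem.Str.isIn suf elem then PySem.Set.add t3 elem else t3) s.2))
    ((PySem.Set.empty, PySem.Set.empty), PySem.Set.empty)
  let temp4 := PySem.Set.inter (PySem.Set.inter acc.1.1 acc.1.2) acc.2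
  temp4.foldl
    (fun m_z2 elem => if PySem.Str.len elem ≤ nmax ∧ nmin ≤ PySem.Str.len elem then PySem.Set.add m_z2 elem else m_z2)
    PySem.Set.empty

-- ===== PORT B =====
def cherche2_alt (mots : List String) (lstart : List String) (lmid : List String) (lstop : List String) (nmin : Int) (nmax : Int) : List String :=
  PySem.Set.ofList (mots.filter (fun w =>
    decide (nmin ≤ PySem.Str.len w ∧ PySem.Str.len w ≤ nmax)
    && lstart.any (fun p => PySem.Str.startswith w p)
    && lstop.any (fun s => PySem.Str.endswith w s)
    && lmid.any (fun s => PySem.Str.isIn s w)))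

-- ===== PRECONDITION & SPEC =====
def Spec_cherche2 (mots : List String) (lstart : List String) (lmid : List String) (lstop : List String) (nmin : Int) (nmax : Int) (out : List String) : Prop := out = cherche2_alt mots lstart lmid lstop nmin nmax
instance (mots : List String) (lstart : List String) (lmid : List String) (lstop : List String) (nmin : Int) (nmax : Int) (out : List String) : Decidable (Spec_cherche2 mots lstart lmid lstop nmin nmax out) := by unfold Spec_cherche2; infer_instance

-- ===== CLAIM (what is proved, stated in full; the proofs are below) =====
def Claim_equal_cherche2 : Prop := ∀ (mots : List String) (lstart : List String) (lmid : List String) (lstop : List String) (nmin : Int) (nmax : Int), Dom_cherche2 mots lstart lmid lstop nmin nmax → Spec_cherche2 mots lstart lmid lstop nmin nmax (cherche2 mots lstart lmid lstop nmin nmax)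

-- ===== LEMMAS AND PROOFS =====

-- A's inner pattern loop only ever adds the ONE word `elem`: it equals a single conditional add.
theorem pvInnerLoop (elem : String) (q : String → Bool) (l : List String) (t : PySem.Set String) :
    l.foldl (fun acc x => if q x then PySem.Set.add acc elem else acc) t
      = if l.any q then PySem.Set.add t elem else t := by
  induction l generalizing t with
  | nil => simp
  | cons h tl ih =>
    simp only [List.foldl_cons, List.any_cons]
    by_cases hq : q h
    · simp [hq, ih]
    · simp [hq, ih]

-- set(...) commutes with filtering (first-occurrence order is preserved).
theorem pvOfListFilter (q : String → Bool) (l : List String) :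
    PySem.Set.ofList (l.filter q) = List.filter q (PySem.Set.ofList l) := by
  induction l with
  | nil => simp [PySem.Set.ofList_nil]
  | cons x xs ih =>
    by_cases hq : q x
    · rw [List.filter_cons_of_pos hq, PySem.Set.ofList_cons, PySem.Set.ofList_cons,
          List.filter_cons_of_pos hq]
      simp only [PySem.Set.discard, ih, List.filter_filter]
      exact congrArg _ (List.filter_congr (fun y _ => by cases hyx : y == x <;> simp_all))
    · rw [List.filter_cons_of_neg hq, PySem.Set.ofList_cons, List.filter_cons_of_neg hq, ih]
      simp only [PySem.Set.discard, List.filter_filter]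
      refine (List.filter_congr fun y _ => ?_).symm
      cases hyx : y == x
      · simp_all
      · have hxy : y = x := by simpa using hyx
        simp_all

theorem cherche2_spec_aux (mots : List String) (lstart : List String) (lmid : List String) (lstop : List String) (nmin : Int) (nmax : Int) :
    cherche2 mots lstart lmid lstop nmin nmax = cherche2_alt mots lstart lmid lstop nmin nmax := by
  unfold cherche2 cherche2_alt
  rw [PySem.List.foldl_prod_mk
      (f := fun (a : PySem.Set String × PySem.Set String) elem =>
        (lstart.foldl (fun t1 pre => if PySem.Str.startswith elem pre then PySem.Set.add t1 elem else t1) a.1,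
         lstop.foldl (fun t2 suf => if PySem.Str.endswith elem suf then PySem.Set.add t2 elem else t2) a.2))
      (g := fun (c : PySem.Set String) elem =>
        lmid.foldl (fun t3 suf => if PySem.Str.isIn suf elem then PySem.Set.add t3 elem else t3) c),
    PySem.List.foldl_prod_mk
      (f := fun (a : PySem.Set String) elem =>
        lstart.foldl (fun t1 pre => if PySem.Str.startswith elem pre then PySem.Set.add t1 elem else t1) a)
      (g := fun (b : PySem.Set String) elem =>
        lstop.foldl (fun t2 suf => if PySem.Str.endswith elem suf then PySem.Set.add t2 elem else t2) b)]
  simp only [pvInnerLoop]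
  simp only [PySem.Set.empty_eq, PySem.List.foldl_if_eq_foldl_filter, PySem.List.foldl_ite_eq_foldl_filter,
    ← PySem.Set.ofList_eq_foldl, PySem.Set.inter]
  rw [← pvOfListFilter, ← pvOfListFilter, ← pvOfListFilter, PySem.Set.ofList_ofList]
  simp only [List.filter_filter]
  refine congrArg _ (List.filter_congr fun w hw => ?_)
  have h2 : (PySem.Set.ofList (List.filter (fun elem => lstop.any fun suf => PySem.Str.endswith elem suf) mots)).contains w
      = lstop.any (fun suf => PySem.Str.endswith w suf) := by
    rw [PySem.Set.contains_eq_decide, Bool.eq_iff_iff]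
    simp [PySem.Set.mem_ofList, List.mem_filter, hw, List.any_eq_true]
  have h3 : (PySem.Set.ofList (List.filter (fun elem => lmid.any fun suf => PySem.Str.isIn suf elem) mots)).contains w
      = lmid.any (fun suf => PySem.Str.isIn suf w) := by
    rw [PySem.Set.contains_eq_decide, Bool.eq_iff_iff]
    simp [PySem.Set.mem_ofList, List.mem_filter, hw, List.any_eq_true]
  rw [h2, h3]
  simp only [Bool.decide_and]
  cases decide (PySem.Str.len w ≤ nmax) <;> cases decide (nmin ≤ PySem.Str.len w) <;>
    cases lstart.any (fun p => PySem.Str.startswith w p) <;>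
    cases lstop.any (fun s => PySem.Str.endswith w s) <;>
    cases lmid.any (fun s => PySem.Str.isIn s w) <;> rfl

-- ===== VERDICT (by name: the statement is the Claim_ definition above) =====
theorem cherche2_spec : Claim_equal_cherche2 := by
  intro mots lstart lmid lstop nmin nmax _hdom
  exact cherche2_spec_aux mots lstart lmid lstop nmin nmax
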